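-- pv_equiv track=rewrite | github.com/ClasicRando/clirest_scraper | collecting.py | rename_column_shapefile
-- ===== SOURCE A (Python) =====
-- from typing import Optional, Any, List
--
-- def rename_column_shapefile(column_names: List[str]) -> dict:
--     new_names = {}
--     for name in column_names:
--         if len(name) <= 10:
--             continue
--         truncated_name = name[:10]
--         if name[:10] in new_names:
--             new_names[truncated_name].append(name)
--         else:
--             new_names[truncated_name] = [name]
--     return {
--         name: f"{truncated_name[:8]}_{i}" if len(names) > 1 else truncated_name
--         for truncated_name, names in new_names.items()
--         for i, name in enumerate(names)
--     }
-- ===== SOURCE B (Python) =====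
-- def rename_column_shapefile(column_names):
--     counts = {}
--     for name in column_names:
--         if len(name) > 10:
--             pre = name[:10]
--             counts[pre] = counts.get(pre, 0) + 1
--     result = {}
--     for pre, cnt in counts.items():
--         i = 0
--         for name in column_names:
--             if len(name) > 10 and name[:10] == pre:
--                 result[name] = f"{pre[:8]}_{i}" if cnt > 1 else pre
--                 i += 1
--     return result
-- ===== Notes on version B (the rewrite author's own statement) =====
-- stated objective: alternative
-- what changed: A groups long names into per-prefix lists and then renames via a double comprehension over the groups; B only keeps a per-prefix count and renames by rescanning the input once per prefix with a running index, never materialising the groups.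
import Mathlib
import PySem

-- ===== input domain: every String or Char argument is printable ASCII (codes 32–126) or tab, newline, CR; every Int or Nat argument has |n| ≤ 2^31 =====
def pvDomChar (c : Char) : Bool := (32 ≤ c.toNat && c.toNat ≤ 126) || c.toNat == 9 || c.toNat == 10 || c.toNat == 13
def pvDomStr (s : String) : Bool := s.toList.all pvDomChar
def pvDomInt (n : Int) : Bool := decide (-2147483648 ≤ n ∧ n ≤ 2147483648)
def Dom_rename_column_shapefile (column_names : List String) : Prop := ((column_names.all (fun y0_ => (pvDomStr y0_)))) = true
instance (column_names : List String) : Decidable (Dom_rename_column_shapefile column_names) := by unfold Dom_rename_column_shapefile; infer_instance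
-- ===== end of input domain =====

-- B replaces A's prefix→list-of-names grouping plus double comprehension by a prefix→count
-- pass followed by, for each prefix, an index-counting rescan of the input (objective: alternative).

-- f"{truncated_name[:8]}_{i}" — the formatting both Pythons compute
def pvFmt (pre : String) (i : Int) : String :=
  PySem.Str.join "" [PySem.Str.slice pre none (some 8), "_", PySem.Int.toStr i]

-- ===== PORT A =====
-- the first loop: new_names = {} ; group the long names by 10-char prefix
def pvAGroup (column_names : List String) : PySem.Dict String (List String) :=
  column_names.foldl (fun d name =>
    if PySem.Str.len name ≤ 10 then d
    else
      if d.contains (PySem.Str.slice name none (some 10)) then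
        d.insert (PySem.Str.slice name none (some 10))
          (d.getD (PySem.Str.slice name none (some 10)) [] ++ [name])
      else d.insert (PySem.Str.slice name none (some 10)) [name]) PySem.Dict.empty

def rename_column_shapefile (column_names : List String) : List (String × String) :=
  ((pvAGroup column_names).items.foldl
    (fun r p =>
      (PySem.List.enumerate p.2 0).foldl
        (fun r q =>
          r.insert q.2 (if PySem.List.len p.2 > 1 then pvFmt p.1 q.1 else p.1)) r)
    PySem.Dict.empty).items

-- ===== PORT B =====
-- first loop of Source B: counts[pre] = counts.get(pre, 0) + 1 over the long names
def pvBCounts (column_names : List String) : PySem.Dict String Int :=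
  column_names.foldl (fun d name =>
    if PySem.Str.len name > 10 then
      d.insert (PySem.Str.slice name none (some 10))
        (d.getD (PySem.Str.slice name none (some 10)) 0 + 1)
    else d) PySem.Dict.empty

def rename_column_shapefile_alt (column_names : List String) : List (String × String) :=
  ((pvBCounts column_names).items.foldl
    (fun r p =>
      (column_names.foldl
        (fun (s : PySem.Dict String String × Int) name =>
          if PySem.Str.len name > 10 && (PySem.Str.slice name none (some 10) == p.1) then
            (s.1.insert name (if p.2 > 1 then pvFmt p.1 s.2 else p.1), s.2 + 1)
          else s)
        (r, 0)).1)
    PySem.Dict.empty).items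

-- ===== PRECONDITION & SPEC =====
def Spec_rename_column_shapefile (column_names : List String) (out : List (String × String)) : Prop := out = rename_column_shapefile_alt column_names
instance (column_names : List String) (out : List (String × String)) : Decidable (Spec_rename_column_shapefile column_names out) := by unfold Spec_rename_column_shapefile; infer_instance

-- ===== CLAIM (what is proved, stated in full; the proofs are below) =====
def Claim_equal_rename_column_shapefile : Prop := ∀ (column_names : List String), Dom_rename_column_shapefile column_names → Spec_rename_column_shapefile column_names (rename_column_shapefile column_names)

-- ===== LEMMAS AND PROOFS =====

-- the long-name test and the 10-char prefix used by both ports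
def pvLong (n : String) : Bool := decide ((10 : Int) < PySem.Str.len n)

def pvPre (n : String) : String := PySem.Str.slice n none (some 10)

def pvPres (cns : List String) : List String := (cns.filter pvLong).map pvPre

def pvGrp (cns : List String) (t : String) : List String :=
  cns.filter (fun n => pvLong n && (pvPre n == t))

theorem pvStep_eq (d : PySem.Dict String (List String)) (t x : String) :
    (if d.contains t then d.insert t (d.getD t [] ++ [x]) else d.insert t [x])
      = d.modify t [] (· ++ [x]) := by
  by_cases h : d.contains t = true
  · simp [h, PySem.Dict.modify]
  · simp only [Bool.not_eq_true] at h
    simp [h, PySem.Dict.modify, PySem.Dict.getD_of_not_contains _ _ h]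

theorem pvA_fold_gen (cns : List String) (d : PySem.Dict String (List String)) :
    cns.foldl (fun d name =>
      if PySem.Str.len name ≤ 10 then d
      else
        if d.contains (PySem.Str.slice name none (some 10)) then
          d.insert (PySem.Str.slice name none (some 10))
            (d.getD (PySem.Str.slice name none (some 10)) [] ++ [name])
        else d.insert (PySem.Str.slice name none (some 10)) [name]) d =
    ((cns.filter pvLong).map (fun n => (pvPre n, n))).foldl
      (fun d p => d.modify p.1 [] (· ++ [p.2])) d := by
  induction cns generalizing d with
  | nil => rfl
  | cons n cns ih =>
    by_cases hl : PySem.Str.len n ≤ 10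
    · have hp : pvLong n = false := by simp only [pvLong, decide_eq_false_iff_not]; omega
      simp only [List.foldl_cons, if_pos hl, List.filter_cons, hp, Bool.false_eq_true,
        ite_false]
      exact ih d
    · have hp : pvLong n = true := by simp only [pvLong, decide_eq_true_eq]; omega
      simp only [List.foldl_cons, if_neg hl, List.filter_cons, hp, ite_true, List.map_cons]
      rw [pvStep_eq]
      exact ih _

theorem pvA_getD (cns : List String) (t : String) :
    (((cns.filter pvLong).map (fun n => (pvPre n, n))).foldl
      (fun d p => d.modify p.1 [] (· ++ [p.2])) PySem.Dict.empty).getD t [] = pvGrp cns t := by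
  rw [PySem.Dict.getD_foldl_modify_append]
  simp [pvGrp, List.filter_map, Function.comp_def, List.filter_filter, Bool.and_comm]

theorem pvA_nodup (cns : List String) :
    (((cns.filter pvLong).map (fun n => (pvPre n, n))).foldl
      (fun d p => d.modify p.1 [] (· ++ [p.2])) PySem.Dict.empty).keys.Nodup := by
  have h := PySem.Dict.nodup_keys_foldl_modify_key
    ((cns.filter pvLong).map (fun n => (pvPre n, n)))
    (fun p : String × String => p.1) ([] : List String)
    (fun _ p => fun x => x ++ [p.2]) PySem.Dict.empty (by simp)
  simpa using h

theorem pvA_keys (cns : List String) :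
    (((cns.filter pvLong).map (fun n => (pvPre n, n))).foldl
      (fun d p => d.modify p.1 [] (· ++ [p.2])) PySem.Dict.empty).keys
      = PySem.Set.ofList (pvPres cns) := by
  have h := PySem.Dict.keys_foldl_modify_key
    ((cns.filter pvLong).map (fun n => (pvPre n, n)))
    (fun p : String × String => p.1) ([] : List String)
    (fun _ p => fun x => x ++ [p.2]) PySem.Dict.empty
  simp only [] at h
  rw [h]
  simp [pvPres, PySem.Set.update, PySem.Set.ofList, List.map_map, Function.comp_def]

theorem pvB_fold_gen (cns : List String) (d : PySem.Dict String Int) :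
    cns.foldl (fun d name =>
      if PySem.Str.len name > 10 then
        d.insert (PySem.Str.slice name none (some 10))
          (d.getD (PySem.Str.slice name none (some 10)) 0 + 1)
      else d) d =
    (pvPres cns).foldl (fun d x => d.insert x (d.getD x 0 + 1)) d := by
  induction cns generalizing d with
  | nil => rfl
  | cons n cns ih =>
    by_cases hl : (10 : Int) < PySem.Str.len n
    · have hp : pvLong n = true := by simp only [pvLong, decide_eq_true_eq]; omega
      simp only [pvPres, List.foldl_cons, if_pos hl, List.filter_cons, hp, ite_true, List.map_cons]
      exact ih _
    · have hp : pvLong n = false := by simp only [pvLong, decide_eq_false_iff_not]; omega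
      simp only [pvPres, List.foldl_cons, if_neg hl, List.filter_cons, hp, Bool.false_eq_true,
        ite_false]
      exact ih d

theorem pvCount (cns : List String) (t : String) :
    (pvPres cns).count t = (pvGrp cns t).length := by
  induction cns with
  | nil => rfl
  | cons n cns ih =>
    by_cases hp : pvLong n = true
    · by_cases he : pvPre n == t
      · simp [pvPres, pvGrp, hp, he, List.count_cons, ih] at *
      · simp [pvPres, pvGrp, hp, he, List.count_cons, ih] at *
    · simp [pvPres, pvGrp, hp, ih] at *

theorem pvScan (xs : List String) (t : String) (V : Int → String)
    (r : PySem.Dict String String) (i : Int) :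
    (xs.foldl
      (fun (s : PySem.Dict String String × Int) name =>
        if pvLong name && (pvPre name == t) then
          (s.1.insert name (V s.2), s.2 + 1)
        else s) (r, i)).1 =
    (PySem.List.enumerate (xs.filter (fun n => pvLong n && (pvPre n == t))) i).foldl
      (fun r q => r.insert q.2 (V q.1)) r := by
  induction xs generalizing r i with
  | nil => rfl
  | cons n xs ih =>
    by_cases h : (pvLong n && (pvPre n == t)) = true
    · simp only [List.foldl_cons, List.filter_cons, h, ite_true, PySem.List.enumerate_cons]
      exact ih _ _
    · simp only [List.foldl_cons, List.filter_cons, h, Bool.false_eq_true, ite_false]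
      exact ih _ _

theorem pvAGroup_items (cns : List String) :
    (pvAGroup cns).items = (PySem.Set.ofList (pvPres cns)).map (fun t => (t, pvGrp cns t)) := by
  have hA : pvAGroup cns =
      ((cns.filter pvLong).map (fun n => (pvPre n, n))).foldl
        (fun d p => d.modify p.1 [] (· ++ [p.2])) PySem.Dict.empty := pvA_fold_gen cns _
  rw [hA, PySem.Dict.items_eq_map_keys _ (pvA_nodup cns) [], pvA_keys]
  refine List.map_congr_left (fun t _ => ?_)
  rw [pvA_getD]

theorem pvBCounts_items (cns : List String) :
    (pvBCounts cns).items =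
      ((pvAGroup cns).items).map (fun p => (p.1, ((p.2.length : Int)))) := by
  have hB : pvBCounts cns = PySem.Dict.counter (pvPres cns) := by
    rw [pvBCounts, pvB_fold_gen, PySem.Dict.foldl_insert_getD_add_one_eq_counter]
  rw [hB, PySem.Dict.items_counter, pvAGroup_items, List.map_map]
  refine List.map_congr_left (fun t _ => ?_)
  simp [pvCount]

theorem main_eq (cns : List String) :
    rename_column_shapefile cns = rename_column_shapefile_alt cns := by
  rw [rename_column_shapefile, rename_column_shapefile_alt, pvBCounts_items, List.foldl_map]
  congr 1
  refine PySem.List.foldl_congr_mem _ _ _ _ (fun acc p hp => ?_)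
  rw [pvAGroup_items] at hp
  obtain ⟨t, _, rfl⟩ := List.mem_map.mp hp
  have hscan := pvScan cns t
    (fun i => if ((pvGrp cns t).length : Int) > 1 then pvFmt t i else t) acc 0
  dsimp only
  simp only [PySem.List.len_eq]
  exact hscan.symm

-- ===== VERDICT (by name: the statement is the Claim_ definition above) =====
theorem rename_column_shapefile_spec : Claim_equal_rename_column_shapefile := by
  intro column_names _
  exact main_eq column_names
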